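-- pv_equiv track=rewrite | github.com/djakub44/pp1 | 12-Test3/mock2/p1.py | f
-- ===== SOURCE A (Python) =====
-- def f(n):
--     arr = []
--     arr2 = []
--     for d in str(n):
--         arr.append(int(d))
--     for i in range(len(arr)):
--         if arr[i] % 2 == 1:
--             arr2.append(arr[i])
--
--     if len(arr2) == 0:
--         return -1
--     else:
--         arr2.sort()
--         return arr2[-1]-arr2[0]
-- ===== SOURCE B (Python) =====
-- def f(n):
--     lo = None
--     hi = None
--     for ch in str(n):
--         d = int(ch)
--         if d % 2 == 1:
--             if lo is None or d < lo:
--                 lo = d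
--             if hi is None or d > hi:
--                 hi = d
--     if lo is None:
--         return -1
--     return hi - lo
-- ===== Notes on version B (the rewrite author's own statement) =====
-- stated objective: simpler
-- what changed: Replaces the build-digit-list / index-loop-filter / sort-then-take-endpoints pipeline with a single pass over str(n) maintaining a running min and max of the odd digits.
import Mathlib
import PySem

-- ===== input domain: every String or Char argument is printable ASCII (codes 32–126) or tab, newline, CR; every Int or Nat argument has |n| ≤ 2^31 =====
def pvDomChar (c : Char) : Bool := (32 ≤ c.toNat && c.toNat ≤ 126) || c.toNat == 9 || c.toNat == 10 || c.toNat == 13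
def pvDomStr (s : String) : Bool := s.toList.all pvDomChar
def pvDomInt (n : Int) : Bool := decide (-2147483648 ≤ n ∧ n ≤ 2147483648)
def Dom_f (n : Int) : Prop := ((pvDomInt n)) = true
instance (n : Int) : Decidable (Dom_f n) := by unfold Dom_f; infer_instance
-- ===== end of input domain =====

-- B: one scan over str(n) keeping running min/max of odd digits, instead of A's
-- list-build + index-loop filter + sort + endpoints; same return value for every nonnegative input.

-- ===== PORT A =====
-- int(d) per char and arr[i] ported with .getD defaults: under Pre_f (nonnegative n) every char is
-- a digit and every index is in range, so the defaults are unreachable.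
def f (n : Int) : Int :=
  let arr : List Int := (PySem.Int.toChars n).foldl
    (fun acc c => acc ++ [(PySem.Int.ofChars? [c]).getD 0]) []
  let arr2 : List Int := (PySem.List.pyRange 0 (PySem.List.len arr)).foldl
    (fun acc i => if PySem.Int.mod (PySem.List.pyGetD arr i 0) 2 = 1
                  then acc ++ [PySem.List.pyGetD arr i 0] else acc) []
  if arr2.length = 0 then (-1)
  else
    let s := PySem.List.sorted arr2 (fun x => x) false
    PySem.List.pyGetD s (-1) 0 - PySem.List.pyGetD s 0 0

-- ===== PORT B =====
-- the 'if lo is None or d < lo: lo = d / if hi is None or d > hi: hi = d' update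
def pvUpd (st : Option Int × Option Int) (d : Int) : Option Int × Option Int :=
  ((match st.1 with | none => some d | some l => if d < l then some d else some l),
   (match st.2 with | none => some d | some h => if h < d then some d else some h))

def f_alt (n : Int) : Int :=
  let st := (PySem.Int.toChars n).foldl
    (fun st c =>
      let d := (PySem.Int.ofChars? [c]).getD 0
      if PySem.Int.mod d 2 = 1 then pvUpd st d else st)
    (none, none)
  match st with
  | (some lo, some hi) => hi - lo
  | _ => -1

-- ===== PRECONDITION & SPEC =====
-- Pre_f excludes n < 0: str(n) then starts with '-' and int('-') raises ValueError in both A and B.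
def Pre_f (n : Int) : Prop := 0 ≤ n
instance (n : Int) : Decidable (Pre_f n) := by unfold Pre_f; infer_instance
def pvWitness_f : Int := 135

def Spec_f (n : Int) (out : Int) : Prop := out = f_alt n
instance (n : Int) (out : Int) : Decidable (Spec_f n out) := by unfold Spec_f; infer_instance

-- ===== CLAIM (what is proved, stated in full; the proofs are below) =====
def Claim_equal_f : Prop := ∀ (n : Int), Dom_f n → Pre_f n → Spec_f n (f n)

-- ===== LEMMAS AND PROOFS =====

-- the min/max fold invariant of B's loop once both accumulators are set
theorem pvUpd_foldl (xs : List Int) (a b : Int) :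
    xs.foldl pvUpd (some a, some b) = (some (xs.foldl min a), some (xs.foldl max b)) := by
  induction xs generalizing a b with
  | nil => rfl
  | cons d t ih =>
    have h1 : pvUpd (some a, some b) d = (some (min a d), some (max b d)) := by
      simp only [pvUpd]
      split_ifs <;> simp [min_def, max_def] <;> omega
    simp only [List.foldl_cons, h1, ih]

theorem pvUpd_foldl_none (x : Int) (t : List Int) :
    (x :: t).foldl pvUpd (none, none) = (some (t.foldl min x), some (t.foldl max x)) := by
  have h0 : pvUpd (none, none) x = (some x, some x) := rfl
  simp only [List.foldl_cons, h0, pvUpd_foldl]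

-- negative index -1 on a nonempty list is the last element
theorem pyGetD_neg_one {s : List Int} (d : Int) (h : s ≠ []) :
    PySem.List.pyGetD s (-1) d = s[s.length - 1]'(by
      have := List.length_pos_iff.mpr h; omega) := by
  have hl : 0 < s.length := List.length_pos_iff.mpr h
  simp only [PySem.List.pyGetD, PySem.List.pyGet?, PySem.List.pyIdx?]
  have h1 : ¬ (0 : Int) ≤ -1 := by omega
  have h2 : -(s.length : Int) ≤ -1 := by omega
  simp only [h1, if_false, h2, if_true, Option.bind]
  have : (-(-1 : Int)).toNat = 1 := rfl
  rw [this, List.getElem?_eq_getElem (by omega)]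
  rfl

-- endpoints of the sorted odd-digit list are the running max / min
theorem sorted_last_eq_foldl_max (x : Int) (t : List Int) :
    PySem.List.pyGetD (PySem.List.sorted (x :: t) (fun y => y) false) (-1) 0 = t.foldl max x := by
  set s := PySem.List.sorted (x :: t) (fun y => y) false with hs
  have hperm : s.Perm (x :: t) := PySem.List.sorted_perm _ _ _
  have hne : s ≠ [] := by
    intro h; rw [PySem.List.sorted_eq_nil_iff] at h; exact List.cons_ne_nil _ _ h
  have hl : 0 < s.length := List.length_pos_iff.mpr hne
  rw [pyGetD_neg_one 0 hne]
  have hmax : PySem.List.max? (x :: t) (fun y => y) = some (t.foldl max x) :=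
    PySem.List.max?_id_cons x t
  have hle : s[s.length - 1]'(by omega) ≤ t.foldl max x := by
    have hmem : s[s.length - 1]'(by omega) ∈ x :: t :=
      hperm.mem_iff.mp (List.getElem_mem _)
    exact PySem.List.max?_isMax hmax _ hmem
  have hge : t.foldl max x ≤ s[s.length - 1]'(by omega) := by
    have hmem : t.foldl max x ∈ s := hperm.mem_iff.mpr (PySem.List.max?_mem hmax)
    obtain ⟨i, hi, hieq⟩ := List.mem_iff_getElem.mp hmem
    calc t.foldl max x = s[i] := hieq.symm
      _ ≤ s[s.length - 1]'(by omega) := PySem.List.sorted_id_getElem_mono _ (by omega) (by rw [← hs]; omega)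
  omega

theorem sorted_head_eq_foldl_min (x : Int) (t : List Int) :
    PySem.List.pyGetD (PySem.List.sorted (x :: t) (fun y => y) false) 0 0 = t.foldl min x := by
  set s := PySem.List.sorted (x :: t) (fun y => y) false with hs
  have hperm : s.Perm (x :: t) := PySem.List.sorted_perm _ _ _
  have hne : s ≠ [] := by
    intro h; rw [PySem.List.sorted_eq_nil_iff] at h; exact List.cons_ne_nil _ _ h
  have hl : 0 < s.length := List.length_pos_iff.mpr hne
  rw [PySem.List.pyGetD_eq_getElem s 0 (by omega) (by exact_mod_cast hl)]
  have hmin : PySem.List.min? (x :: t) (fun y => y) = some (t.foldl min x) :=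
    PySem.List.min?_id_cons x t
  have hge : t.foldl min x ≤ s[(0 : Int).toNat] := by
    have hmem : s[(0 : Int).toNat] ∈ x :: t := hperm.mem_iff.mp (List.getElem_mem _)
    exact PySem.List.min?_isMin hmin _ hmem
  have hle : s[(0 : Int).toNat] ≤ t.foldl min x := by
    have hmem : t.foldl min x ∈ s := hperm.mem_iff.mpr (PySem.List.min?_mem hmin)
    obtain ⟨i, hi, hieq⟩ := List.mem_iff_getElem.mp hmem
    calc s[(0 : Int).toNat] ≤ s[i] := PySem.List.sorted_id_getElem_mono _ (by omega) hi
      _ = t.foldl min x := hieq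
  omega

-- the common core: A's tail (on any digit list) equals B's tail
theorem core_eq (l : List Int) :
    (let arr2 := l.filter (fun x => decide (PySem.Int.mod x 2 = 1))
     if arr2.length = 0 then (-1 : Int)
     else
       let s := PySem.List.sorted arr2 (fun x => x) false
       PySem.List.pyGetD s (-1) 0 - PySem.List.pyGetD s 0 0)
    = (match (l.filter (fun x => decide (PySem.Int.mod x 2 = 1))).foldl pvUpd (none, none) with
       | (some lo, some hi) => hi - lo
       | _ => (-1 : Int)) := by
  cases h : l.filter (fun x => decide (PySem.Int.mod x 2 = 1)) with
  | nil => simp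
  | cons x t =>
    simp only [pvUpd_foldl_none, List.length_cons]
    rw [if_neg (by omega)]
    rw [sorted_last_eq_foldl_max, sorted_head_eq_foldl_min]

theorem b_fold_as_map (cs : List Char) (st : Option Int × Option Int) :
    cs.foldl (fun st c =>
        if PySem.Int.mod ((PySem.Int.ofChars? [c]).getD 0) 2 = 1
        then pvUpd st ((PySem.Int.ofChars? [c]).getD 0) else st) st
    = (cs.map (fun c => (PySem.Int.ofChars? [c]).getD 0)).foldl
        (fun st d => if PySem.Int.mod d 2 = 1 then pvUpd st d else st) st := by
  induction cs generalizing st with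
  | nil => rfl
  | cons c t ih => simp only [List.foldl_cons, List.map_cons, ih]

-- ===== VERDICT (by name: the statement is the Claim_ definition above) =====
theorem f_spec : Claim_equal_f := by
  intro n _ _
  show f n = f_alt n
  unfold f f_alt
  simp only [PySem.List.foldl_append_singleton_eq_map, List.nil_append,
    PySem.List.foldl_pyRange_pyGetD _ 0
      (fun acc x => if PySem.Int.mod x 2 = 1 then acc ++ [x] else acc) [] (le_refl 0),
    Int.toNat_zero, List.drop_zero,
    PySem.List.foldl_append_ite_eq_filter (fun x => PySem.Int.mod x 2 = 1),
    b_fold_as_map,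
    PySem.List.foldl_ite_eq_foldl_filter (fun x => PySem.Int.mod x 2 = 1) pvUpd]
  exact core_eq _
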